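-- pv_equiv track=rewrite | github.com/hlajungo/online_judge_python3 | itsa/最少派車數.py | interval_interval
-- ===== SOURCE A (Python) =====
-- import heapq
-- from collections import defaultdict
--
-- def interval_interval(intervals):
--     intervals.sort(key=lambda x: x[0])  # sort by start time
--
--     heap = []  # (interval end, id)
--
--     dict1 = defaultdict(list) # [id, interval]
--     car_id_counter = 1  # 車號 1
--
--     for interval in intervals:
--         start, end = interval
--
--         if heap and heap[0][0] <= start: # heap[0] 是 tuple，使用 [0] 存取 tuple
--             # 有車可以用（最早空的車）
--             old_end, car_id = heapq.heappop(heap)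
--         else:
--             # 沒車用，派新車
--             car_id = car_id_counter
--             car_id_counter += 1
--
--         dict1[car_id].append(interval)
--         heapq.heappush(heap, (end, car_id))
--
--     return dict1
-- ===== SOURCE B (Python) =====
-- from collections import defaultdict
--
-- def interval_interval(intervals):
--     intervals.sort(key=lambda x: x[0])  # sort by start time (in place, like A)
--
--     ends = []  # ends[k] = current end time of car k+1, in car-creation order
--     dict1 = defaultdict(list)
--
--     for interval in intervals:
--         start, end = interval
--
--         # linear scan for the car with the smallest (current_end, car_id)
--         best = None
--         for i, e in enumerate(ends, start=1):
--             if best is None or (e, i) < best: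
--                 best = (e, i)
--
--         if best is not None and best[0] <= start:
--             car_id = best[1]
--             ends[car_id - 1] = end
--         else:
--             ends.append(end)
--             car_id = len(ends)
--
--         dict1[car_id].append(interval)
--
--     return dict1
-- ===== Notes on version B (the rewrite author's own statement) =====
-- stated objective: simpler
-- what changed: Replaces the binary heap of (end, car_id) pairs by a plain per-car end-time array scanned linearly for the minimum (end, id) each iteration, with car ids recovered from array positions instead of a counter.
import Mathlib
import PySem

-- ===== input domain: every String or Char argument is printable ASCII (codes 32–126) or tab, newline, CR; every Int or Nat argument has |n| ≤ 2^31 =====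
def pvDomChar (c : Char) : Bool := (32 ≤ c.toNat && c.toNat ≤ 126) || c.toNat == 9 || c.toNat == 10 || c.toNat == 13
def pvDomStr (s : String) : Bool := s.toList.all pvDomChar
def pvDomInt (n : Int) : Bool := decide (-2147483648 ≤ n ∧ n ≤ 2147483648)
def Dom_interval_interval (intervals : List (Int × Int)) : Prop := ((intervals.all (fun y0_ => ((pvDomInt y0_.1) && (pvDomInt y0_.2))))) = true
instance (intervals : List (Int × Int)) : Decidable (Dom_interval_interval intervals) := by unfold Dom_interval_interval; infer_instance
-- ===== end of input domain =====

-- B replaces A's heap by a per-car end-time list scanned for the minimal (end, id); same result,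
-- simpler bookkeeping.  Both Pythons sort `intervals` in place; the equivalence proved here is
-- about the RETURN value (both perform the identical in-place sort).

-- ===== PORT A =====
-- shared primitive: dict1[car_id].append(interval) on a defaultdict(list)
def dictAppend (d : List (Int × List (Int × Int))) (k : Int) (iv : Int × Int) :
    List (Int × List (Int × Int)) :=
  ((PySem.Dict.mk d).insert k ((PySem.Dict.mk d).getD k [] ++ [iv])).items

-- Python tuple comparison (e1, i1) <= (e2, i2)
def pleb (a b : Int × Int) : Bool := a.1 < b.1 || (a.1 == b.1 && a.2 ≤ b.2)

-- heapq is a library call in A; it is ported by its documented contract: heap[0] is the smallest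
-- element under tuple comparison.  The heap list is modelled as kept sorted: heappush = ordered
-- insertion, heappop = take the head.  This is exact for every value A observes from the heap.
def heapPush (h : List (Int × Int)) (x : Int × Int) : List (Int × Int) :=
  match h with
  | [] => [x]
  | y :: t => if pleb x y then x :: y :: t else y :: heapPush t x

def loopA : List (Int × Int) → List (Int × Int) → List (Int × List (Int × Int)) → Int →
    List (Int × List (Int × Int))
  | [], _heap, d, _ctr => d
  | (start, e) :: rest, heap, d, ctr =>
    match heap with
    | (_oldEnd, carId) :: htail =>
      if _oldEnd ≤ start then   -- `heap and heap[0][0] <= start`: reuse the earliest-free car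
        loopA rest (heapPush htail (e, carId)) (dictAppend d carId (start, e)) ctr
      else                       -- no car free: new car `ctr`
        loopA rest (heapPush heap (e, ctr)) (dictAppend d ctr (start, e)) (ctr + 1)
    | [] => loopA rest (heapPush heap (e, ctr)) (dictAppend d ctr (start, e)) (ctr + 1)

def interval_interval (intervals : List (Int × Int)) : List (Int × List (Int × Int)) :=
  loopA (PySem.List.sorted intervals (fun x => x.1) false) [] [] 1

-- ===== PORT B =====
-- Python tuple comparison (e1, i1) < (e2, i2)
def ltPair (a b : Int × Int) : Bool := a.1 < b.1 || (a.1 == b.1 && a.2 < b.2)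

-- `for i, e in enumerate(ends, start=1): if best is None or (e, i) < best: best = (e, i)`
def scanBest : List Int → Int → Option (Int × Int) → Option (Int × Int)
  | [], _, best => best
  | e :: t, i, best =>
    scanBest t (i + 1)
      (match best with
       | none => some (e, i)
       | some b => if ltPair (e, i) b then some (e, i) else some b)

def loopB : List (Int × Int) → List Int → List (Int × List (Int × Int)) →
    List (Int × List (Int × Int))
  | [], _ends, d => d
  | (start, e) :: rest, ends, d =>
    match scanBest ends 1 none with
    | some b =>
      if b.1 ≤ start then      -- reuse car b.2 : ends[b.2 - 1] = e
        loopB rest (ends.set (b.2 - 1).toNat e) (dictAppend d b.2 (start, e))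
      else
        loopB rest (ends ++ [e]) (dictAppend d ((ends.length : Int) + 1) (start, e))
    | none => loopB rest (ends ++ [e]) (dictAppend d ((ends.length : Int) + 1) (start, e))

def interval_interval_alt (intervals : List (Int × Int)) : List (Int × List (Int × Int)) :=
  loopB (PySem.List.sorted intervals (fun x => x.1) false) [] []

-- ===== PRECONDITION & SPEC =====
def Spec_interval_interval (intervals : List (Int × Int)) (out : List (Int × List (Int × Int))) : Prop := out = interval_interval_alt intervals
instance (intervals : List (Int × Int)) (out : List (Int × List (Int × Int))) : Decidable (Spec_interval_interval intervals out) := by unfold Spec_interval_interval; infer_instance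

-- ===== CLAIM (what is proved, stated in full; the proofs are below) =====
def Claim_equal_interval_interval : Prop := ∀ (intervals : List (Int × Int)), Dom_interval_interval intervals → Spec_interval_interval intervals (interval_interval intervals)

-- ===== LEMMAS AND PROOFS =====

-- ends with car ids attached: enumFrom 1 ends = [(ends[0],1), (ends[1],2), …]
def enumFrom : Int → List Int → List (Int × Int)
  | _, [] => []
  | i, e :: t => (e, i) :: enumFrom (i + 1) t

theorem pleb_refl (a : Int × Int) : pleb a a = true := by
  simp [pleb]

theorem pleb_trans {a b c : Int × Int} (h1 : pleb a b = true) (h2 : pleb b c = true) :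
    pleb a c = true := by
  simp only [pleb, Bool.or_eq_true, Bool.and_eq_true, decide_eq_true_eq, beq_iff_eq] at *
  omega

theorem pleb_antisymm {a b : Int × Int} (h1 : pleb a b = true) (h2 : pleb b a = true) :
    a = b := by
  simp only [pleb, Bool.or_eq_true, Bool.and_eq_true, decide_eq_true_eq, beq_iff_eq] at *
  obtain ⟨a1, a2⟩ := a; obtain ⟨b1, b2⟩ := b
  simp_all; omega

theorem pleb_of_not_pleb {a b : Int × Int} (h : pleb a b = false) : pleb b a = true := by
  simp only [pleb, Bool.or_eq_false_iff, Bool.or_eq_true, Bool.and_eq_false_iff,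
    Bool.and_eq_true, decide_eq_true_eq, decide_eq_false_iff_not, beq_iff_eq, beq_eq_false_iff_ne] at *
  omega

theorem pleb_of_ltPair {a b : Int × Int} (h : ltPair a b = true) : pleb a b = true := by
  simp only [ltPair, pleb, Bool.or_eq_true, Bool.and_eq_true, decide_eq_true_eq, beq_iff_eq] at *
  omega

theorem pleb_of_not_ltPair {a b : Int × Int} (h : ltPair a b = false) : pleb b a = true := by
  simp only [ltPair, pleb, Bool.or_eq_false_iff, Bool.or_eq_true, Bool.and_eq_false_iff,
    Bool.and_eq_true, decide_eq_true_eq, decide_eq_false_iff_not, beq_iff_eq, beq_eq_false_iff_ne] at *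
  omega

theorem heapPush_perm (h : List (Int × Int)) (x : Int × Int) :
    (heapPush h x).Perm (x :: h) := by
  induction h with
  | nil => simp [heapPush]
  | cons y t ih =>
    simp only [heapPush]
    split
    · exact List.Perm.refl _
    · exact (ih.cons y).trans (List.Perm.swap x y t)

theorem heapPush_sorted {h : List (Int × Int)} (x : Int × Int)
    (hs : h.Pairwise (fun a b => pleb a b = true)) :
    (heapPush h x).Pairwise (fun a b => pleb a b = true) := by
  induction h with
  | nil => simp [heapPush]
  | cons y t ih =>
    rcases List.pairwise_cons.mp hs with ⟨hy, ht⟩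
    simp only [heapPush]
    split
    · rename_i hxy
      refine List.pairwise_cons.mpr ⟨?_, hs⟩
      intro z hz
      rcases hz with _ | hz
      · exact hxy
      · exact pleb_trans hxy (hy _ (by assumption))
    · rename_i hxy
      refine List.pairwise_cons.mpr ⟨?_, ih ht⟩
      intro z hz
      rcases List.mem_cons.mp ((heapPush_perm t x).mem_iff.mp hz) with h1 | h1
      · subst h1; exact pleb_of_not_pleb (by simpa using hxy)
      · exact hy _ h1

theorem scan_spec (t : List Int) :
    ∀ (i : Int) (q p : Int × Int), scanBest t i (some q) = some p →
      (p = q ∨ p ∈ enumFrom i t) ∧ pleb p q = true ∧ ∀ r ∈ enumFrom i t, pleb p r = true := by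
  induction t with
  | nil =>
    intro i q p hp
    simp [scanBest] at hp
    subst hp
    exact ⟨Or.inl rfl, pleb_refl _, by simp [enumFrom]⟩
  | cons e tt ih =>
    intro i q p hp
    simp only [scanBest] at hp
    by_cases hlt : ltPair (e, i) q = true
    · rw [if_pos hlt] at hp
      obtain ⟨hmem, hle, hall⟩ := ih (i + 1) (e, i) p hp
      have hpei : pleb p (e, i) = true := hle
      refine ⟨?_, pleb_trans hpei (pleb_of_ltPair hlt), ?_⟩
      · rcases hmem with h | h
        · exact Or.inr (by simp [enumFrom, h])
        · exact Or.inr (by simp [enumFrom]; right; exact h)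
      · intro r hr
        simp only [enumFrom, List.mem_cons] at hr
        rcases hr with h | h
        · subst h; exact hpei
        · exact hall r h
    · rw [if_neg hlt] at hp
      obtain ⟨hmem, hle, hall⟩ := ih (i + 1) q p hp
      have hqe : pleb q (e, i) = true := pleb_of_not_ltPair (by simpa using hlt)
      refine ⟨?_, hle, ?_⟩
      · rcases hmem with h | h
        · exact Or.inl h
        · exact Or.inr (by simp [enumFrom]; right; exact h)
      · intro r hr
        simp only [enumFrom, List.mem_cons] at hr
        rcases hr with h | h
        · subst h; exact pleb_trans hle hqe
        · exact hall r h

theorem scan_acc_some (t : List Int) :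
    ∀ (i : Int) (q : Int × Int), ∃ p, scanBest t i (some q) = some p := by
  induction t with
  | nil => intro i q; exact ⟨q, rfl⟩
  | cons e tt ih =>
    intro i q
    simp only [scanBest]
    split <;> exact ih _ _

theorem scan_min {ends : List Int} (hne : ends ≠ []) :
    ∃ p, scanBest ends 1 none = some p ∧ p ∈ enumFrom 1 ends ∧
      ∀ r ∈ enumFrom 1 ends, pleb p r = true := by
  cases ends with
  | nil => exact absurd rfl hne
  | cons e t =>
    obtain ⟨p, hp⟩ := scan_acc_some t 2 (e, 1)
    obtain ⟨hmem, hle, hall⟩ := scan_spec t 2 (e, 1) p hp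
    refine ⟨p, by simpa [scanBest] using hp, ?_, ?_⟩
    · simp only [enumFrom, List.mem_cons]
      rcases hmem with h | h
      · exact Or.inl h
      · exact Or.inr h
    · intro r hr
      simp only [enumFrom, List.mem_cons] at hr
      rcases hr with h | h
      · subst h; exact hle
      · exact hall r h

theorem enumFrom_length : ∀ (l : List Int) (i : Int), (enumFrom i l).length = l.length := by
  intro l
  induction l with
  | nil => intro i; rfl
  | cons e t ih => intro i; simp [enumFrom, ih]

theorem enumFrom_getElem : ∀ (l : List Int) (i : Int) (k : Nat) (hk : k < l.length),
    (enumFrom i l)[k]'(by rw [enumFrom_length]; exact hk) = (l[k], i + (k : Int)) := by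
  intro l
  induction l with
  | nil => intro i k hk; simp at hk
  | cons e t ih =>
    intro i k hk
    cases k with
    | zero => simp [enumFrom]
    | succ k' =>
      have := ih (i + 1) k' (by simpa using hk)
      simp only [enumFrom, List.getElem_cons_succ, this, Prod.mk.injEq]
      refine ⟨trivial, by omega⟩

theorem enumFrom_set : ∀ (l : List Int) (i : Int) (k : Nat) (e : Int),
    enumFrom i (l.set k e) = (enumFrom i l).set k (e, i + (k : Int)) := by
  intro l
  induction l with
  | nil => intro i k e; simp [enumFrom]
  | cons e0 t ih =>
    intro i k e
    cases k with
    | zero => simp [enumFrom]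
    | succ k' =>
      simp only [List.set_cons_succ, enumFrom, ih (i + 1) k' e]
      have : i + 1 + (k' : Int) = i + ((k' : Nat) + 1 : Nat) := by push_cast; ring
      rw [this]

theorem enumFrom_append : ∀ (l : List Int) (i e : Int),
    enumFrom i (l ++ [e]) = enumFrom i l ++ [(e, i + (l.length : Int))] := by
  intro l
  induction l with
  | nil => intro i e; simp [enumFrom]
  | cons e0 t ih =>
    intro i e
    simp only [List.cons_append, enumFrom, ih (i + 1) e, List.length_cons]
    have : i + 1 + (t.length : Int) = i + ((t.length : Nat) + 1 : Nat) := by push_cast; ring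
    rw [this]

theorem loop_eq (ivs : List (Int × Int)) :
    ∀ (heap : List (Int × Int)) (ends : List Int) (d : List (Int × List (Int × Int))) (ctr : Int),
      heap.Pairwise (fun a b => pleb a b = true) →
      heap.Perm (enumFrom 1 ends) →
      ctr = (ends.length : Int) + 1 →
      loopA ivs heap d ctr = loopB ivs ends d := by
  induction ivs with
  | nil => intro heap ends d ctr _ _ _; rfl
  | cons iv rest ih =>
    intro heap ends d ctr hs hp hc
    obtain ⟨start, e⟩ := iv
    cases hends : ends with
    | nil =>
      subst hends
      have hheap : heap = [] := List.Perm.eq_nil (by simpa [enumFrom] using hp)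
      subst hheap
      simp only [loopA, loopB, scanBest, heapPush]
      have hc1 : ctr = 1 := by simpa using hc
      subst hc1
      have : (([] : List Int) ++ [e]) = [e] := rfl
      rw [this]
      exact ih [(e, 1)] [e] _ 2 (by simp) (by simp [enumFrom]) (by simp)
    | cons e0 t0 =>
      subst hends
      -- the heap is nonempty
      cases hh : heap with
      | nil =>
        exfalso
        have := hp.length_eq
        rw [hh] at this
        simp [enumFrom] at this
      | cons h0 ht =>
        subst hh
        obtain ⟨p, hscan, hpmem, hpmin⟩ := scan_min (ends := e0 :: t0) (by simp)
        -- the heap head equals the scanned minimum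
        have hh0min : ∀ r ∈ enumFrom 1 (e0 :: t0), pleb h0 r = true := by
          intro r hr
          have hrheap : r ∈ h0 :: ht := hp.symm.subset hr
          rcases List.mem_cons.mp hrheap with h | h
          · subst h; exact pleb_refl _
          · exact (List.pairwise_cons.mp hs).1 r h
        have hph0 : pleb p h0 = true := hpmin h0 (hp.subset (by simp))
        have hph : h0 = p := pleb_antisymm (hh0min p hpmem) hph0
        -- locate p in ends
        obtain ⟨k, hk, hpk⟩ := List.mem_iff_getElem.mp hpmem
        have hkl : k < (e0 :: t0).length := by
          have := enumFrom_length (e0 :: t0) 1; omega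
        have hpval : p = ((e0 :: t0)[k], 1 + (k : Int)) := by
          rw [← hpk]; exact enumFrom_getElem (e0 :: t0) 1 k hkl
        obtain ⟨oe, cid⟩ := h0
        subst hph
        have hp2 : cid = 1 + (k : Int) := congrArg Prod.snd hpval
        simp only [loopA, loopB, hscan]
        by_cases hcond : oe ≤ start
        · rw [if_pos hcond, if_pos hcond]
          have hidx : (cid - 1).toNat = k := by omega
          rw [hidx]
          apply ih
          · exact heapPush_sorted _ (List.pairwise_cons.mp hs).2
          · have hperm1 := heapPush_perm ht (e, cid)
            have hkE : k < (enumFrom 1 (e0 :: t0)).length := by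
              rw [enumFrom_length]; exact hkl
            have hEp : (enumFrom 1 (e0 :: t0)).Perm
                ((oe, cid) :: (enumFrom 1 (e0 :: t0)).eraseIdx k) := by
              have h2 := List.getElem_cons_eraseIdx_perm hkE
              rw [hpk] at h2
              exact h2.symm
            have hht : ht.Perm ((enumFrom 1 (e0 :: t0)).eraseIdx k) :=
              (hp.trans hEp).cons_inv
            rw [enumFrom_set (e0 :: t0) 1 k e, ← hp2]
            exact hperm1.trans ((hht.cons (e, cid)).trans
              (List.set_perm_cons_eraseIdx hkE (e, cid)).symm)
          · simpa using hc
        · rw [if_neg hcond, if_neg hcond]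
          rw [hc]
          apply ih
          · exact heapPush_sorted _ hs
          · rw [enumFrom_append]
            have h1 : (1 : Int) + ((e0 :: t0).length : Int) = ((e0 :: t0).length : Int) + 1 := by
              ring
            rw [h1]
            exact (heapPush_perm _ _).trans
              ((hp.cons _).trans (List.perm_append_singleton _ _).symm)
          · simp

-- ===== VERDICT (by name: the statement is the Claim_ definition above) =====
theorem interval_interval_spec : Claim_equal_interval_interval := by
  intro intervals _
  unfold Spec_interval_interval interval_interval interval_interval_alt
  exact loop_eq _ [] [] [] 1 (by simp) (by simp [enumFrom]) (by simp)
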